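-- pv_equiv track=rewrite | github.com/qize-auto/pipemind | pipemind_memory_evolution.py | _format_conv
-- ===== SOURCE A (Python) =====
-- def _format_conv(messages, max_chars=2000):
--     """取最近 N 轮对话，格式化为文本"""
--     parts = []
--     total = 0
--     for msg in messages[-10:]:
--         role = msg.get("role", "?")
--         content = str(msg.get("content", ""))[:300]
--         if not content.strip():
--             continue
--         text = f"[{role}] {content}"
--         if total + len(text) > max_chars:
--             break
--         parts.append(text)
--         total += len(text)
--     return "\n".join(parts)
-- ===== SOURCE B (Python) =====
-- def _format_conv(messages, max_chars=2000):
--     """取最近 N 轮对话，格式化为文本"""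
--     # pass 1: format and filter
--     texts = []
--     for msg in messages[-10:]:
--         content = str(msg.get("content", ""))[:300]
--         if content.strip():
--             texts.append(f"[{msg.get('role', '?')}] {content}")
--     # pass 2: longest prefix whose running length total stays <= max_chars
--     total = 0
--     k = 0
--     for t in texts:
--         total += len(t)
--         if total > max_chars:
--             break
--         k += 1
--     return "\n".join(texts[:k])
-- ===== Notes on version B (the rewrite author's own statement) =====
-- stated objective: alternative
-- what changed: A's single fused loop (format, skip blanks, track running length, break) is split into two passes: a format-and-filter pass building the list of texts, then a prefix-cutoff pass counting how many texts fit the running-length budget, joining texts[:k].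
import Mathlib
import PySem

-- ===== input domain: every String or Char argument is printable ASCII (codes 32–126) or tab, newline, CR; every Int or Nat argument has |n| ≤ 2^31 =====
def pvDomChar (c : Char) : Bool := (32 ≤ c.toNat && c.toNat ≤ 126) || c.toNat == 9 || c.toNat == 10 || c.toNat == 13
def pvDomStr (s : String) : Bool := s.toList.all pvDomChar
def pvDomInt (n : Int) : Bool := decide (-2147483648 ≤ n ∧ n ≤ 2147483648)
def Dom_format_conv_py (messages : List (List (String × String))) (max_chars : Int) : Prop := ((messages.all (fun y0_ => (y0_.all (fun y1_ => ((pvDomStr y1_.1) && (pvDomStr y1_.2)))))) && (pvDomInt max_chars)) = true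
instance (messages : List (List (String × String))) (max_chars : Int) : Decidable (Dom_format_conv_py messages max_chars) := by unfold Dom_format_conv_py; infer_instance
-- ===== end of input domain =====

-- B splits A's fused format/budget loop into a format-filter pass followed by a prefix-length cutoff pass (objective: alternative decomposition, same cost).


-- ===== PORT A =====
-- the loop over messages[-10:] with state (parts, total); f-string "[{role}] {content}" ported as Str.join "" (exact concatenation)
def pvLoopA (max_chars : Int) : List (List (String × String)) → List String → Int → List String
  | [], parts, _ => parts
  | msg :: rest, parts, total =>
    let role := (PySem.Dict.mk msg).getD "role" "?"
    let content := PySem.Str.slice ((PySem.Dict.mk msg).getD "content" "") none (some 300)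
    if PySem.Str.strip content = "" then pvLoopA max_chars rest parts total
    else
      let text := PySem.Str.join "" ["[", role, "] ", content]
      if total + PySem.Str.len text > max_chars then parts
      else pvLoopA max_chars rest (parts ++ [text]) (total + PySem.Str.len text)

def format_conv_py (messages : List (List (String × String))) (max_chars : Int) : String :=
  PySem.Str.join "\n" (pvLoopA max_chars (PySem.List.slice messages (some (-10)) none) [] 0)

-- ===== PORT B =====
-- pass 1: format and filter (None = skipped blank message)
def pvFmtB (msg : List (String × String)) : Option String :=
  let content := PySem.Str.slice ((PySem.Dict.mk msg).getD "content" "") none (some 300)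
  if PySem.Str.strip content = "" then none
  else some (PySem.Str.join "" ["[", (PySem.Dict.mk msg).getD "role" "?", "] ", content])

-- pass 2: count how many texts fit (running total ≤ max_chars, break at first overflow)
def pvCutB (max_chars : Int) : List String → Int → Int → Int
  | [], _, k => k
  | t :: ts, total, k =>
    let total' := total + PySem.Str.len t
    if total' > max_chars then k else pvCutB max_chars ts total' (k + 1)

def format_conv_py_alt (messages : List (List (String × String))) (max_chars : Int) : String :=
  let texts := (PySem.List.slice messages (some (-10)) none).filterMap pvFmtB
  PySem.Str.join "\n" (PySem.List.slice texts none (some (pvCutB max_chars texts 0 0)))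

-- ===== PRECONDITION & SPEC =====
def Spec_format_conv_py (messages : List (List (String × String))) (max_chars : Int) (out : String) : Prop := out = format_conv_py_alt messages max_chars
instance (messages : List (List (String × String))) (max_chars : Int) (out : String) : Decidable (Spec_format_conv_py messages max_chars out) := by unfold Spec_format_conv_py; infer_instance

-- ===== CLAIM (what is proved, stated in full; the proofs are below) =====
def Claim_equal_format_conv_py : Prop := ∀ (messages : List (List (String × String))) (max_chars : Int), Dom_format_conv_py messages max_chars → Spec_format_conv_py messages max_chars (format_conv_py messages max_chars)

-- ===== LEMMAS AND PROOFS =====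

-- reference selection: the prefix of texts kept under budget, as a list
def pvSel (max_chars : Int) : List String → Int → List String
  | [], _ => []
  | t :: ts, total =>
    if total + PySem.Str.len t > max_chars then []
    else t :: pvSel max_chars ts (total + PySem.Str.len t)

theorem pvLoopA_eq_sel (mc : Int) (msgs : List (List (String × String))) :
    ∀ parts total, pvLoopA mc msgs parts total = parts ++ pvSel mc (msgs.filterMap pvFmtB) total := by
  induction msgs with
  | nil => intro parts total; simp [pvLoopA, pvSel]
  | cons msg rest ih =>
    intro parts total
    rw [List.filterMap_cons]
    by_cases h : PySem.Str.strip (PySem.Str.slice ((PySem.Dict.mk msg).getD "content" "") none (some 300)) = ""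
    · have hf : pvFmtB msg = none := by simp [pvFmtB, h]
      rw [hf]
      simp only [pvLoopA, if_pos h]
      exact ih parts total
    · have hf : pvFmtB msg = some (PySem.Str.join "" ["[", (PySem.Dict.mk msg).getD "role" "?", "] ",
        PySem.Str.slice ((PySem.Dict.mk msg).getD "content" "") none (some 300)]) := by
        simp [pvFmtB, h]
      rw [hf]
      simp only [pvLoopA, if_neg h, pvSel]
      split_ifs with h2
      · simp
      · rw [ih]; simp

theorem pvCutB_shift (mc : Int) (ts : List String) :
    ∀ total k, pvCutB mc ts total k = k + pvCutB mc ts total 0 := by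
  induction ts with
  | nil => intro total k; simp [pvCutB]
  | cons t ts ih =>
    intro total k
    simp only [pvCutB]
    split_ifs with h
    · simp
    · rw [ih _ (k + 1), ih _ (0 + 1)]
      omega

theorem pvCutB_nonneg (mc : Int) (ts : List String) : ∀ total, 0 ≤ pvCutB mc ts total 0 := by
  induction ts with
  | nil => intro total; simp [pvCutB]
  | cons t ts ih =>
    intro total
    simp only [pvCutB]
    split_ifs with h
    · exact le_refl 0
    · rw [pvCutB_shift]
      have := ih (total + PySem.Str.len t)
      omega

theorem pvSel_eq_take (mc : Int) (ts : List String) :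
    ∀ total, pvSel mc ts total = ts.take (pvCutB mc ts total 0).toNat := by
  induction ts with
  | nil => intro total; simp [pvSel, pvCutB]
  | cons t ts ih =>
    intro total
    simp only [pvSel, pvCutB]
    split_ifs with h
    · simp
    · rw [pvCutB_shift, ih]
      have h0 := pvCutB_nonneg mc ts (total + PySem.Str.len t)
      have hT : (0 + 1 + pvCutB mc ts (total + PySem.Str.len t) 0).toNat
          = (pvCutB mc ts (total + PySem.Str.len t) 0).toNat + 1 := by omega
      rw [hT, List.take_succ_cons]

-- ===== VERDICT (by name: the statement is the Claim_ definition above) =====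
theorem format_conv_py_spec : Claim_equal_format_conv_py := by
  intro messages max_chars _
  unfold Spec_format_conv_py format_conv_py
  simp only [format_conv_py_alt]
  rw [pvLoopA_eq_sel, List.nil_append, pvSel_eq_take, PySem.List.slice_to]
  exact pvCutB_nonneg _ _ _
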